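-- pv_equiv track=rewrite | github.com/Karera-o/Books-MindMaps | improve_book_data.py | shorten_title
-- ===== SOURCE A (Python) =====
-- def shorten_title(title, max_length=40):
--     if len(title) <= max_length:
--         return title
--
--     # Try to cut at a sensible place (space or punctuation)
--     cutoff = max_length
--     while cutoff > 20 and title[cutoff] not in [' ', ':', '-', '.', ',']:
--         cutoff -= 1
--
--     if cutoff <= 20:  # If we couldn't find a good breakpoint
--         cutoff = max_length
--
--     return title[:cutoff] + "..."
-- ===== SOURCE B (Python) =====
-- def shorten_title(title, max_length=40):
--     if len(title) <= max_length:
--         return title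
--     # Collect every breakpoint position in the window (20, max_length] in one
--     # forward comprehension; the cutoff is the last one, or max_length if none.
--     breaks = {' ', ':', '-', '.', ','}
--     cuts = [i for i in range(21, max_length + 1) if title[i] in breaks]
--     cutoff = cuts[-1] if cuts else max_length
--     return title[:cutoff] + "..."
-- ===== Notes on version B (the rewrite author's own statement) =====
-- stated objective: idiomatic
-- what changed: Replaces the backward char-by-char while-loop with a mutable cutoff (and its <=20 reset) by a forward list comprehension collecting all breakpoint indices in the window [21, max_length], taking the last one or falling back to max_length; the per-iteration list literal becomes a prebuilt set, a constant-factor win.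
import Mathlib
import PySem

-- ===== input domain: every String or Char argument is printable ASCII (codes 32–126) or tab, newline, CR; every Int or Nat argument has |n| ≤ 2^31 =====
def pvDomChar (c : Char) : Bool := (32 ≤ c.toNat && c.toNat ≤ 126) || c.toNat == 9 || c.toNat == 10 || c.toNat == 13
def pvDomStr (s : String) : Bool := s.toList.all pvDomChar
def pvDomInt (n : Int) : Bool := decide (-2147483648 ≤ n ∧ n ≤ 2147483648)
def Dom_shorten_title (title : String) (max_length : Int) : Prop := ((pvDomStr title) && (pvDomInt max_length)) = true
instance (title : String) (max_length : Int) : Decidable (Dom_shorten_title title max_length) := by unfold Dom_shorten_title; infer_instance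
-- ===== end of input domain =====

-- B replaces A's backward while-loop (mutable cutoff with a <=20 reset) by a forward
-- comprehension over the window [21, max_length] taking the last breakpoint index (idiomatic).

-- ===== PORT A =====
-- A's while loop: decrement cutoff while cutoff > 20 and title[cutoff] is no breakpoint.
-- title[cutoff] is ported with pyGetD: whenever the loop body runs, 20 < cutoff ≤ max_length
-- < len(title), so the index is in range and the default is never read (Python A never raises).
def pvLoopA (cs : List Char) (cutoff : Int) : Int :=
  if h : 20 < cutoff ∧ ¬ ([' ', ':', '-', '.', ','].contains (PySem.List.pyGetD cs cutoff ' ')) then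
    pvLoopA cs (cutoff - 1)
  else cutoff
termination_by cutoff.toNat
decreasing_by omega

def shorten_title (title : String) (max_length : Int) : String :=
  if PySem.Str.len title ≤ max_length then title
  else
    let cutoff := pvLoopA title.toList max_length
    let cutoff' := if cutoff ≤ 20 then max_length else cutoff
    -- title[:cutoff] + "..." (string concatenation done on the char lists, exact)
    String.ofList (PySem.List.slice title.toList none (some cutoff') ++ ['.', '.', '.'])

-- ===== PORT B =====
-- breaks = {' ', ':', '-', '.', ','} : a set literal (distinct chars)
def pvBreaksB : List Char := PySem.Set.ofList [' ', ':', '-', '.', ',']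

-- [i for i in range(21, max_length + 1) if title[i] in breaks]
-- (indices in range: 21 ≤ i ≤ max_length < len(title) whenever the comprehension runs)
def pvCutsB (cs : List Char) (max_length : Int) : List Int :=
  (PySem.List.pyRange 21 (max_length + 1)).filter
    (fun i => pvBreaksB.contains (PySem.List.pyGetD cs i ' '))

def shorten_title_alt (title : String) (max_length : Int) : String :=
  if PySem.Str.len title ≤ max_length then title
  else
    let cuts := pvCutsB title.toList max_length
    -- cutoff = cuts[-1] if cuts else max_length
    let cutoff := match cuts.getLast? with
      | some i => i
      | none => max_length
    String.ofList (PySem.List.slice title.toList none (some cutoff) ++ ['.', '.', '.'])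

-- ===== PRECONDITION & SPEC =====
def Spec_shorten_title (title : String) (max_length : Int) (out : String) : Prop := out = shorten_title_alt title max_length
instance (title : String) (max_length : Int) (out : String) : Decidable (Spec_shorten_title title max_length out) := by unfold Spec_shorten_title; infer_instance

-- ===== CLAIM (what is proved, stated in full; the proofs are below) =====
def Claim_equal_shorten_title : Prop := ∀ (title : String) (max_length : Int), Dom_shorten_title title max_length → Spec_shorten_title title max_length (shorten_title title max_length)

-- ===== LEMMAS AND PROOFS =====

-- the two membership tests agree (the set literal deduplicates a duplicate-free list)
lemma pvBreaksB_eq : pvBreaksB = [' ', ':', '-', '.', ','] := by decide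

-- below 21 the window is empty
lemma pvCutsB_nil (cs : List Char) (k : Int) (hk : k ≤ 20) : pvCutsB cs k = [] := by
  unfold pvCutsB
  have : PySem.List.pyRange 21 (k + 1) = [] := by
    apply List.eq_nil_iff_forall_not_mem.mpr
    intro x hx
    have := PySem.List.mem_pyRange_one.mp hx
    omega
  rw [this]; rfl

-- the loop never moves when started at or below 20
lemma pvLoopA_le (cs : List Char) (k : Int) (hk : k ≤ 20) : pvLoopA cs k = k := by
  rw [pvLoopA, dif_neg]
  intro h
  omega

-- A's loop, started at any k = 20 + n, lands on the last breakpoint index in [21, k], or on 20.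
lemma pvLoopA_eq_cuts (cs : List Char) :
    ∀ (n : Nat) (k : Int), k = 20 + (n : Int) →
      pvLoopA cs k = (pvCutsB cs k).getLast?.getD 20 := by
  intro n
  induction n with
  | zero =>
      intro k hk
      have h20 : k ≤ 20 := by omega
      rw [pvCutsB_nil cs k h20, pvLoopA_le cs k h20]
      simp; omega
  | succ m ih =>
      intro k hk
      have hk20 : 20 < k := by push_cast at hk; omega
      have hm : k - 1 = 20 + (m : Int) := by push_cast at hk ⊢; omega
      have hrange : PySem.List.pyRange 21 (k + 1) = PySem.List.pyRange 21 k ++ [k] :=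
        PySem.List.pyRange_one_succ_right (by omega)
      have hk1 : k - 1 + 1 = k := by ring
      have hcuts : pvCutsB cs k =
          pvCutsB cs (k - 1) ++
            (if PySem.List.pyGetD cs k ' ' ∈ pvBreaksB then [k] else []) := by
        unfold pvCutsB
        rw [hk1, hrange, List.filter_append]
        congr 1
        by_cases hd : PySem.List.pyGetD cs k ' ' ∈ pvBreaksB <;> simp [List.filter, hd]
      by_cases hbr : PySem.List.pyGetD cs k ' ' ∈ pvBreaksB
      · have hc : ([' ', ':', '-', '.', ','].contains (PySem.List.pyGetD cs k ' ')) = true := by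
          rw [pvBreaksB_eq] at hbr; simpa using hbr
        have hA : pvLoopA cs k = k := by
          rw [pvLoopA, dif_neg]
          exact fun h => h.2 hc
        rw [hA, hcuts, if_pos hbr, List.getLast?_concat]
        rfl
      · have hc : ([' ', ':', '-', '.', ','].contains (PySem.List.pyGetD cs k ' ')) = false := by
          rw [pvBreaksB_eq] at hbr; simpa using hbr
        have hA : pvLoopA cs k = pvLoopA cs (k - 1) := by
          rw [pvLoopA, dif_pos ⟨hk20, by simpa using hc⟩]
        rw [hA, ih (k - 1) hm, hcuts, if_neg hbr, List.append_nil]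

-- ===== VERDICT (by name: the statement is the Claim_ definition above) =====
theorem shorten_title_spec : Claim_equal_shorten_title := by
  unfold Claim_equal_shorten_title
  intro title ml _
  unfold Spec_shorten_title shorten_title shorten_title_alt
  by_cases hlen : PySem.Str.len title ≤ ml
  · simp only [if_pos hlen]
  · simp only [if_neg hlen]
    congr 2
    by_cases h20 : ml ≤ 20
    · rw [pvLoopA_le _ _ h20, pvCutsB_nil _ _ h20]
      simp [h20]
    · have := pvLoopA_eq_cuts title.toList (ml - 20).toNat ml (by omega)
      rw [this]
      cases hlast : (pvCutsB title.toList ml).getLast? with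
      | none => simp
      | some i =>
          have hi : 21 ≤ i := by
            have hmem : i ∈ pvCutsB title.toList ml := List.mem_of_getLast? hlast
            unfold pvCutsB at hmem
            have := (List.mem_filter.mp hmem).1
            exact (PySem.List.mem_pyRange_one.mp this).1
          simp only [Option.getD_some]
          rw [if_neg (by omega)]
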